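-- pv_equiv track=rewrite | github.com/Guvit-C/friends-mobiles-seo | strategy_agent.py | _consecutive_declines
-- ===== SOURCE A (Python) =====
-- def _consecutive_declines(history: list[dict]) -> int:
--     """Return number of consecutive 'watch' (no improvement) runs at the end."""
--     count = 0
--     for row in reversed(history):
--         if row.get("status") == "watch":
--             count += 1
--         else:
--             break
--     return count
-- ===== SOURCE B (Python) =====
-- def _consecutive_declines(history: list[dict]) -> int:
--     """Return number of consecutive 'watch' (no improvement) runs at the end."""
--     count = 0
--     for row in history:
--         if row.get("status") == "watch":
--             count += 1
--         else:
--             count = 0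
--     return count
-- ===== Notes on version B (the rewrite author's own statement) =====
-- stated objective: alternative
-- what changed: B replaces A's reversed iteration with early break by a single forward pass keeping a running counter that resets to 0 on any non-watch row.
import Mathlib
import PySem

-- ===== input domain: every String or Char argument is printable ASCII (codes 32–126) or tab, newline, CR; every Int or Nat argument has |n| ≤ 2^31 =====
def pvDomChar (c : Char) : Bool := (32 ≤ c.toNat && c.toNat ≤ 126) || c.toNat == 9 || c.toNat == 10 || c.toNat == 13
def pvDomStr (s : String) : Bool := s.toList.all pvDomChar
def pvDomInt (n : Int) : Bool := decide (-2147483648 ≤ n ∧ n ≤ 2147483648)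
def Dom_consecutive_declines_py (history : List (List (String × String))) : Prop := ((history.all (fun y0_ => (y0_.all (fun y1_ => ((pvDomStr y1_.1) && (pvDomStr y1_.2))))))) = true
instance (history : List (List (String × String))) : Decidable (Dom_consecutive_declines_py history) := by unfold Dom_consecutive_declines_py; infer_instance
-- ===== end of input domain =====

-- B replaces A's reversed iteration with early break (port: accumulator recursion on the reversed list)
-- by a single forward pass whose counter resets to 0 on a non-watch row; same result, different control flow.

-- ===== PORT A =====
-- the 'for row in reversed(history): … else: break' loop, as recursion on history.reverse with the count accumulator
def pvALoop (count : Int) : List (List (String × String)) → Int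
  | [] => count
  | row :: rest =>
      if (PySem.Dict.mk row).get? "status" == some "watch" then pvALoop (count + 1) rest else count

def consecutive_declines_py (history : List (List (String × String))) : Int :=
  pvALoop 0 history.reverse

-- ===== PORT B =====
def consecutive_declines_py_alt (history : List (List (String × String))) : Int :=
  history.foldl (fun count row => if (PySem.Dict.mk row).get? "status" == some "watch" then count + 1 else 0) 0

-- ===== PRECONDITION & SPEC =====
def Spec_consecutive_declines_py (history : List (List (String × String))) (out : Int) : Prop := out = consecutive_declines_py_alt history
instance (history : List (List (String × String))) (out : Int) : Decidable (Spec_consecutive_declines_py history out) := by unfold Spec_consecutive_declines_py; infer_instance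

-- ===== CLAIM (what is proved, stated in full; the proofs are below) =====
def Claim_equal_consecutive_declines_py : Prop := ∀ (history : List (List (String × String))), Dom_consecutive_declines_py history → Spec_consecutive_declines_py history (consecutive_declines_py history)

-- ===== LEMMAS AND PROOFS =====

lemma pvALoop_acc (l : List (List (String × String))) : ∀ c : Int, pvALoop c l = c + pvALoop 0 l := by
  induction l with
  | nil => intro c; simp [pvALoop]
  | cons r rs ih =>
      intro c
      by_cases h : (PySem.Dict.mk r).get? "status" == some "watch"
      · simp [pvALoop, h, ih (c + 1), ih 1]; ring
      · simp [pvALoop, h]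

lemma pv_main (l : List (List (String × String))) :
    consecutive_declines_py_alt l = pvALoop 0 l.reverse := by
  induction l using List.reverseRecOn with
  | nil => rfl
  | append_singleton l x ih =>
      have hfold : consecutive_declines_py_alt (l ++ [x]) =
          (if (PySem.Dict.mk x).get? "status" == some "watch" then consecutive_declines_py_alt l + 1 else 0) := by
        simp [consecutive_declines_py_alt, List.foldl_append]
      rw [hfold, ih, List.reverse_append, List.reverse_singleton, List.singleton_append]
      by_cases h : (PySem.Dict.mk x).get? "status" == some "watch"
      · have hx : pvALoop 0 (x :: l.reverse) = pvALoop (0 + 1) l.reverse := by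
          simp [pvALoop, h]
        simp only [h, if_true, hx]
        rw [pvALoop_acc l.reverse (0 + 1)]
        omega
      · simp [h, pvALoop]

-- ===== VERDICT (by name: the statement is the Claim_ definition above) =====
theorem consecutive_declines_py_spec : Claim_equal_consecutive_declines_py := by
  intro history _
  unfold Spec_consecutive_declines_py consecutive_declines_py
  exact (pv_main history).symm
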